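-- pv_equiv track=rewrite | github.com/pf981/advent-of-code-and-friends | project-euler/solutions/081_path_sum_two_ways.py | iterate_zigzag
-- ===== SOURCE A (Python) =====
-- from collections.abc import Generator
--
-- def iterate_zigzag(
--     matrix: list[list[int]],
-- ) -> Generator[tuple[int, int], None, None]:
--     for start_column in reversed(range(len(matrix))):
--         for row in reversed(range(start_column + 1, len(matrix))):
--             yield (row, len(matrix) + start_column - row)
--
--     for start_row in reversed(range(len(matrix))):
--         for column in range(start_row + 1):
--             yield (start_row - column, column)
-- ===== SOURCE B (Python) =====
-- def iterate_zigzag(matrix):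
--     n = len(matrix)
--     cells = [(r, c) for r in range(n) for c in range(n)]
--     # rank is strictly increasing along A's order: later anti-diagonals (larger r+c)
--     # come first, and within a diagonal larger r comes first
--     cells.sort(key=lambda rc: -((rc[0] + rc[1]) * n + rc[0]))
--     yield from cells
-- ===== Notes on version B (the rewrite author's own statement) =====
-- stated objective: alternative
-- what changed: A's two nested triangular diagonal sweeps are replaced by generating all n*n coordinates in row-major order and sorting them once by the integer rank -((r+c)*n + r), which is strictly increasing along A's zigzag order (later anti-diagonals first, rows descending within a diagonal).
import Mathlib
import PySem

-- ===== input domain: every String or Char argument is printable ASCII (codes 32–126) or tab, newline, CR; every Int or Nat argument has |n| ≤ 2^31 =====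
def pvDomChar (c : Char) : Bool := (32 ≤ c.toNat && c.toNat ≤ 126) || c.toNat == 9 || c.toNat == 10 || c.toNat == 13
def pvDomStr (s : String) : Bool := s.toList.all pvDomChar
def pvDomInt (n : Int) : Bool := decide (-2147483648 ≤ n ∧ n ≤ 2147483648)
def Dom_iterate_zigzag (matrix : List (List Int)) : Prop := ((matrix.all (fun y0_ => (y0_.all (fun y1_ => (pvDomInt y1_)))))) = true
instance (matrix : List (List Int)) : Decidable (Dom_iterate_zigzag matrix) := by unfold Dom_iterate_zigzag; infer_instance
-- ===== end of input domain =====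

-- B replaces A's two nested diagonal sweeps by generating all n*n coordinates in
-- row-major order and sorting them once by an integer rank (objective: alternative algorithm).

-- ===== PORT A =====
def iterate_zigzag (matrix : List (List Int)) : List (Int × Int) :=
  let n : Int := matrix.length
  let out1 : List (Int × Int) :=
    ((PySem.List.pyRange 0 n 1).reverse).foldl
      (fun acc start_column =>
        acc ++ ((PySem.List.pyRange (start_column + 1) n 1).reverse).map
          (fun row => (row, n + start_column - row))) []
  ((PySem.List.pyRange 0 n 1).reverse).foldl
    (fun acc start_row =>
      acc ++ (PySem.List.pyRange 0 (start_row + 1) 1).map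
        (fun column => (start_row - column, column))) out1

-- ===== PORT B =====
def iterate_zigzag_alt (matrix : List (List Int)) : List (Int × Int) :=
  let n : Int := matrix.length
  let cells : List (Int × Int) :=
    (PySem.List.pyRange 0 n 1).flatMap
      (fun r => (PySem.List.pyRange 0 n 1).map (fun c => (r, c)))
  PySem.List.sorted cells (fun rc => -((rc.1 + rc.2) * n + rc.1)) false

-- ===== PRECONDITION & SPEC =====
def Spec_iterate_zigzag (matrix : List (List Int)) (out : List (Int × Int)) : Prop := out = iterate_zigzag_alt matrix
instance (matrix : List (List Int)) (out : List (Int × Int)) : Decidable (Spec_iterate_zigzag matrix out) := by unfold Spec_iterate_zigzag; infer_instance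

-- ===== CLAIM (what is proved, stated in full; the proofs are below) =====
def Claim_equal_iterate_zigzag : Prop := ∀ (matrix : List (List Int)), Dom_iterate_zigzag matrix → Spec_iterate_zigzag matrix (iterate_zigzag matrix)

-- ===== LEMMAS AND PROOFS =====

-- Proof-only canonical form: A's output, one flatMap over the diagonal index k
-- (the anti-diagonal is d = 2n-2-k), rows descending inside each diagonal.
def zzList (n : Int) : List (Int × Int) :=
  (List.range (2 * n - 1).toNat).flatMap (fun (k : Nat) =>
    let d : Int := 2 * n - 2 - (k : Int)
    let hi : Int := min (n - 1) d
    let lo : Int := max 0 (d - (n - 1))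
    (List.range (hi + 1 - lo).toNat).map (fun (j : Nat) => (hi - (j : Int), d - (hi - (j : Int)))))

-- Intermediate shape: A's two loops fused into one fold over all diagonals.
def zzFold (n : Int) : List (Int × Int) :=
  ((PySem.List.pyRange 0 (2 * n - 1) 1).reverse).foldl
    (fun acc d =>
      let lo := max 0 (d - (n - 1))
      let hi := min (n - 1) d
      acc ++ ((PySem.List.pyRange lo (hi + 1) 1).reverse).map (fun r => (r, d - r))) []

-- B's generated cells, as a flatMap over List.range.
def cellsList (n : Int) : List (Int × Int) :=
  (List.range n.toNat).flatMap (fun (r : Nat) =>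
    (List.range n.toNat).map (fun (c : Nat) => ((r : Int), (c : Int))))

-- A reversed ascending pyRange, written as a map over List.range.
theorem rev_pyRange (a b : Int) :
    (PySem.List.pyRange a b 1).reverse = (List.range (b - a).toNat).map (fun k : Nat => b - 1 - (k : Int)) := by
  have h := PySem.List.pyRange_neg_one_eq_reverse (b - 1) (a - 1)
  rw [PySem.List.pyRange_neg_one] at h
  have e1 : b - 1 + 1 = b := by ring
  have e2 : a - 1 + 1 = a := by ring
  rw [e1, e2] at h
  rw [← h]
  have e3 : b - 1 - (a - 1) = b - a := by ring
  rw [e3]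

-- A's port equals the fused fold over diagonals.
theorem pv_A_eq_zzFold (matrix : List (List Int)) :
    iterate_zigzag matrix = zzFold matrix.length := by
  unfold iterate_zigzag zzFold
  simp only [PySem.List.foldl_append_eq_flatMap, List.nil_append, rev_pyRange,
    List.flatMap_map, List.map_map]
  generalize matrix.length = nn
  obtain rfl | ⟨m, rfl⟩ : nn = 0 ∨ ∃ m, nn = m + 1 := by
    rcases nn with _ | m
    · exact Or.inl rfl
    · exact Or.inr ⟨m, rfl⟩
  · simp
  · rw [show ((2:Int) * ↑(m+1) - 1 - 0).toNat = m + (m+1) by push_cast; omega]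
    rw [show ((↑(m+1):Int) - 0).toNat = m + 1 by push_cast; omega]
    conv_rhs => rw [List.range_add, List.flatMap_append]
    congr 1
    · -- A's first loop (d = 2n-2 down to n; A's empty start_column = n-1 heads the split-off range)
      conv_lhs => rw [List.range_succ_eq_map]
      rw [List.flatMap_cons, List.flatMap_map]
      rw [show ((↑(m+1):Int) - (↑(m+1) - 1 - ((0:Nat):Int) + 1)).toNat = 0 by push_cast; omega]
      simp only [List.range_zero, List.map_nil, List.nil_append]
      apply List.flatMap_congr
      intro a ha
      rw [List.mem_range] at ha
      have h1 : min ((↑(m+1):Int) - 1) (2 * ↑(m+1) - 1 - 1 - ↑a) = ↑(m+1) - 1 := by push_cast; omega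
      have h2 : max (0:Int) (2 * ↑(m+1) - 1 - 1 - ↑a - (↑(m+1) - 1)) = ↑(m+1) - 1 - (↑a.succ : Int) + 1 := by
        push_cast [Nat.succ_eq_add_one]; omega
      rw [h1, h2]
      congr 1
      · funext k
        simp only [Function.comp]
        refine Prod.ext ?_ ?_ <;> (push_cast [Nat.succ_eq_add_one]; omega)
      · congr 1
        push_cast [Nat.succ_eq_add_one]
        omega
    · -- A's second loop (d = n-1 down to 0), with the inner range reflected
      rw [List.flatMap_map]
      apply List.flatMap_congr
      intro a ha
      rw [List.mem_range] at ha
      have h1 : min ((↑(m+1):Int) - 1) (2 * ↑(m+1) - 1 - 1 - ↑(m + a)) = ↑(m+1) - 1 - ↑a := by push_cast; omega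
      have h2 : max (0:Int) (2 * ↑(m+1) - 1 - 1 - ↑(m + a) - (↑(m+1) - 1)) = 0 := by push_cast; omega
      rw [h1, h2, PySem.List.pyRange_one, List.map_map]
      apply List.map_congr_left
      intro k _
      simp only [Function.comp]
      refine Prod.ext ?_ ?_ <;> (push_cast; omega)

-- The fused fold, rewritten to the canonical flatMap over List.range.
theorem pv_zzFold_zz (n : Int) : zzFold n = zzList n := by
  unfold zzFold zzList
  simp only [PySem.List.foldl_append_eq_flatMap, List.nil_append, rev_pyRange,
    List.flatMap_map, List.map_map]
  rw [show (2*n-1-0 : Int) = 2*n-1 from by ring]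
  refine List.flatMap_congr (fun k _ => ?_)
  rw [show (2*n-1-1-(k:Int) : Int) = 2*n-2-(k:Int) from by ring]
  rw [show (min (n-1) (2*n-2-(k:Int)) + 1 - 1 : Int) = min (n-1) (2*n-2-(k:Int)) from by ring]
  refine List.map_congr_left (fun j _ => ?_)
  simp [Function.comp]

-- B's comprehension equals the canonical cells list.
theorem pv_cells (n : Int) :
    (PySem.List.pyRange 0 n 1).flatMap
      (fun r => (PySem.List.pyRange 0 n 1).map (fun c => (r, c))) = cellsList n := by
  unfold cellsList
  simp only [PySem.List.pyRange_one,
    show ((n:Int) - 0).toNat = n.toNat from by omega]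
  rw [List.flatMap_map]
  refine List.flatMap_congr (fun r _ => ?_)
  rw [List.map_map]
  refine List.map_congr_left (fun c _ => ?_)
  simp

-- zzList is strictly increasing under B's sort key.
theorem pv_zz_pairwise (n : Int) :
    (zzList n).Pairwise
      (fun a b : Int × Int => -((a.1 + a.2) * n + a.1) < -((b.1 + b.2) * n + b.1)) := by
  unfold zzList
  rw [List.pairwise_flatMap]
  constructor
  · intro k _
    rw [List.pairwise_map]
    refine List.Pairwise.imp ?_ List.pairwise_lt_range
    intro j1 j2 h
    simp only []
    have e : ∀ x : Int, min (n-1) (2*n-2-(k:Int)) - x + (2*n-2-(k:Int) - (min (n-1) (2*n-2-(k:Int)) - x)) = 2*n-2-(k:Int) := by intro x; ring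
    rw [e, e]
    generalize (2*n-2-(k:Int)) * n = t
    omega
  · refine List.Pairwise.imp ?_ List.pairwise_lt_range
    intro k1 k2 hk x hx y hy
    simp only [List.mem_map, List.mem_range] at hx hy
    obtain ⟨j1, hj1, rfl⟩ := hx
    obtain ⟨j2, hj2, rfl⟩ := hy
    simp only []
    have e : ∀ d x : Int, min (n-1) d - x + (d - (min (n-1) d - x)) = d := by intro d x; ring
    rw [e, e]
    have hn : (0:Int) ≤ n := by omega
    have hd : (2*n-2-(k2:Int)) + 1 ≤ 2*n-2-(k1:Int) := by omega
    have hm := mul_le_mul_of_nonneg_right hd hn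
    have h2 : ((2*n-2-(k2:Int)) + 1) * n = (2*n-2-(k2:Int))*n + n := by ring
    have r1lo : (0:Int) ≤ min (n-1) (2*n-2-(k1:Int)) - (j1:Int) := by omega
    have r2hi : min (n-1) (2*n-2-(k2:Int)) - (j2:Int) ≤ n - 1 := by omega
    linarith

-- cellsList is strictly increasing under row-major rank.
theorem pv_cells_pairwise (n : Int) :
    (cellsList n).Pairwise
      (fun a b : Int × Int => a.1 * n + a.2 < b.1 * n + b.2) := by
  unfold cellsList
  rw [List.pairwise_flatMap]
  constructor
  · intro r _
    rw [List.pairwise_map]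
    refine List.Pairwise.imp ?_ List.pairwise_lt_range
    intro c1 c2 h
    simp only []
    generalize ((r:Int)) * n = t
    omega
  · refine List.Pairwise.imp ?_ List.pairwise_lt_range
    intro r1 r2 hr x hx y hy
    simp only [List.mem_map, List.mem_range] at hx hy
    obtain ⟨c1, hc1, rfl⟩ := hx
    obtain ⟨c2, hc2, rfl⟩ := hy
    simp only []
    have hn : (0:Int) ≤ n := by omega
    have hd : ((r1:Int)) + 1 ≤ (r2:Int) := by omega
    have hm := mul_le_mul_of_nonneg_right hd hn
    have h2 : ((r1:Int) + 1) * n = (r1:Int)*n + n := by ring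
    have hcc1 : ((c1:Int)) ≤ n - 1 := by omega
    have hcc2 : (0:Int) ≤ (c2:Int) := by omega
    linarith

-- membership in zzList: exactly the coordinates of the n×n square
theorem pv_mem_zz (n : Int) (p : Int × Int) :
    p ∈ zzList n ↔ 0 ≤ p.1 ∧ p.1 < n ∧ 0 ≤ p.2 ∧ p.2 < n := by
  unfold zzList
  simp only [List.mem_flatMap, List.mem_map, List.mem_range]
  constructor
  · rintro ⟨k, hk, j, hj, rfl⟩
    refine ⟨by omega, by omega, by omega, by omega⟩
  · rintro ⟨h1, h2, h3, h4⟩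
    refine ⟨(2 * n - 2 - (p.1 + p.2)).toNat, by omega,
            (min (n - 1) (p.1 + p.2) - p.1).toNat, by omega, ?_⟩
    cases p; simp; constructor <;> omega

theorem pv_mem_cells (n : Int) (p : Int × Int) :
    p ∈ cellsList n ↔ 0 ≤ p.1 ∧ p.1 < n ∧ 0 ≤ p.2 ∧ p.2 < n := by
  unfold cellsList
  simp only [List.mem_flatMap, List.mem_map, List.mem_range]
  constructor
  · rintro ⟨r, hr, c, hc, rfl⟩
    simp; omega
  · rintro ⟨h1, h2, h3, h4⟩
    refine ⟨p.1.toNat, by omega, p.2.toNat, by omega, ?_⟩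
    cases p; simp; omega

theorem pv_zz_nodup (n : Int) : (zzList n).Nodup :=
  List.Pairwise.imp (fun {a b} h => by rintro rfl; omega) (pv_zz_pairwise n)

theorem pv_cells_nodup (n : Int) : (cellsList n).Nodup :=
  List.Pairwise.imp (fun {a b} h => by rintro rfl; omega) (pv_cells_pairwise n)

theorem pv_perm (n : Int) : (zzList n).Perm (cellsList n) := by
  rw [List.perm_ext_iff_of_nodup (pv_zz_nodup n) (pv_cells_nodup n)]
  intro p
  rw [pv_mem_zz, pv_mem_cells]

theorem pv_main (matrix : List (List Int)) :
    iterate_zigzag matrix = iterate_zigzag_alt matrix := by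
  unfold iterate_zigzag_alt
  simp only [pv_cells]
  rw [pv_A_eq_zzFold, pv_zzFold_zz]
  exact (PySem.List.sorted_eq_of_perm_of_pairwise_lt _ _ _ (pv_perm _) (pv_zz_pairwise _)).symm

-- ===== VERDICT (by name: the statement is the Claim_ definition above) =====
theorem iterate_zigzag_spec : Claim_equal_iterate_zigzag := by
  intro matrix _
  unfold Spec_iterate_zigzag
  exact pv_main matrix
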